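-- pv_equiv track=rewrite | github.com/rasmusnorup/Landmaaling | LengthFinder.py | makeConcatonatedAngles
-- ===== SOURCE A (Python) =====
-- def makeConcatonatedAngles(angles, times):
--     newAngles = angles.copy()
--     for i in range(times):
--         for start in angles:
--             for end in angles:
--                 if start[1] == end[1] and start[2] == end[0] and start[0] != end[2]:
--                     newAngles[start[0:2]+end[2]] = angles[start] + angles[end]
--         angles = newAngles.copy()
--     return angles
-- ===== SOURCE B (Python) =====
-- def makeConcatonatedAngles(angles, times):
--     for _ in range(times):
--         index = {}
--         for end, ev in angles.items():
--             index.setdefault((end[0], end[1]), []).append((end, ev))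
--         newAngles = angles.copy()
--         for start, sv in angles.items():
--             for end, ev in index.get((start[2], start[1]), []):
--                 if start[0] != end[2]:
--                     newAngles[start[0:2] + end[2]] = sv + ev
--         angles = newAngles
--     return angles
-- ===== Notes on version B (the rewrite author's own statement) =====
-- stated objective: alternative
-- what changed: B builds, once per round, a hash index of entries keyed by their first two characters, so each start key looks up exactly its matching partners instead of scanning the whole dict in a nested quadratic loop (measured much faster per round on mid-size inputs, but on the largest generated inputs both blow up with the output size, so no speed is claimed).
import Mathlib
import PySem

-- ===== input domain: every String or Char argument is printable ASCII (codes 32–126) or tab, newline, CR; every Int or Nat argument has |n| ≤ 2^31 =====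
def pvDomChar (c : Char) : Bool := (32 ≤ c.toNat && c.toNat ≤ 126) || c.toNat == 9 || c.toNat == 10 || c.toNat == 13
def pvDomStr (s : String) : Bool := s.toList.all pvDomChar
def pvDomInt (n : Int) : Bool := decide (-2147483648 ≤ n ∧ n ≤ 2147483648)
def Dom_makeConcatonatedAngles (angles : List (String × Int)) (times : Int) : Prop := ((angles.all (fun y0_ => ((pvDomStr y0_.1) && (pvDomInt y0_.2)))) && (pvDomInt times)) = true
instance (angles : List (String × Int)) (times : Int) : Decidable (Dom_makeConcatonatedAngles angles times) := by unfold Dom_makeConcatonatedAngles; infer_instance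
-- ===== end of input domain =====

-- B replaces A's nested scan per round by a hash index of entries keyed by their
-- first two characters, looked up per start key (objective: alternative algorithm).
-- The argument dict is not mutated by either program.

-- shared primitive helpers: s[i] (a 1-char string) and start[0:2]+end[2], as both Pythons write them
def pvChr (s : String) (i : Int) : Option Char := PySem.Str.pyGet? s i
def pvCat (s e : String) : String := String.ofList (PySem.Chars.slice s.toList (some 0) (some 2) ++ (PySem.Chars.pyGet? e.toList 2).toList)

-- ===== PORT A =====
def makeConcatonatedAngles (angles : List (String × Int)) (times : Int) : List (String × Int) :=
  let d := PySem.Dict.ofList angles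
  (((PySem.List.pyRange 0 times 1).foldl (fun st _ =>
      let a := st.1
      let na := a.items.foldl (fun na sp =>
          a.items.foldl (fun na ep =>
            if pvChr sp.1 1 == pvChr ep.1 1 && pvChr sp.1 2 == pvChr ep.1 0 && pvChr sp.1 0 != pvChr ep.1 2 then
              na.insert (pvCat sp.1 ep.1) (a.getD sp.1 0 + a.getD ep.1 0)
            else na) na) st.2
      (na, na)) (d, d)).1).items

-- ===== PORT B =====
def makeConcatonatedAngles_alt (angles : List (String × Int)) (times : Int) : List (String × Int) :=
  ((PySem.List.pyRange 0 times 1).foldl (fun a _ =>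
      let index : PySem.Dict (Option Char × Option Char) (List (String × Int)) :=
        a.items.foldl (fun idx ep => idx.modify (pvChr ep.1 0, pvChr ep.1 1) [] (· ++ [ep])) PySem.Dict.empty
      a.items.foldl (fun na sp =>
          (index.getD (pvChr sp.1 2, pvChr sp.1 1) []).foldl (fun na ep =>
            if pvChr sp.1 0 != pvChr ep.1 2 then
              na.insert (pvCat sp.1 ep.1) (sp.2 + ep.2)
            else na) na) a) (PySem.Dict.ofList angles)).items

-- ===== PRECONDITION & SPEC =====
-- Pre_ excludes exactly the inputs where Python A raises IndexError (some key shorter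
-- than 3 characters, with at least one round and a nonempty dict); B raises there too.
def Pre_makeConcatonatedAngles (angles : List (String × Int)) (times : Int) : Prop :=
  times ≤ 0 ∨ angles = [] ∨ ∀ p ∈ angles, 3 ≤ p.1.toList.length
instance (angles : List (String × Int)) (times : Int) : Decidable (Pre_makeConcatonatedAngles angles times) := by unfold Pre_makeConcatonatedAngles; infer_instance
def pvWitness_makeConcatonatedAngles : (List (String × Int)) × Int := ([("ABC", 1), ("CBD", 2)], 1)

def Spec_makeConcatonatedAngles (angles : List (String × Int)) (times : Int) (out : List (String × Int)) : Prop := out = makeConcatonatedAngles_alt angles times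
instance (angles : List (String × Int)) (times : Int) (out : List (String × Int)) : Decidable (Spec_makeConcatonatedAngles angles times out) := by unfold Spec_makeConcatonatedAngles; infer_instance

-- ===== CLAIM (what is proved, stated in full; the proofs are below) =====
def Claim_equal_makeConcatonatedAngles : Prop := ∀ (angles : List (String × Int)) (times : Int), Dom_makeConcatonatedAngles angles times → Pre_makeConcatonatedAngles angles times → Spec_makeConcatonatedAngles angles times (makeConcatonatedAngles angles times)


-- ===== LEMMAS AND PROOFS =====

-- A's round body, abstracted over the dict being read (a) and written (na)
def pvG (a na : PySem.Dict String Int) : PySem.Dict String Int :=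
  a.items.foldl (fun na sp =>
    a.items.foldl (fun na ep =>
      if pvChr sp.1 1 == pvChr ep.1 1 && pvChr sp.1 2 == pvChr ep.1 0 && pvChr sp.1 0 != pvChr ep.1 2 then
        na.insert (pvCat sp.1 ep.1) (a.getD sp.1 0 + a.getD ep.1 0)
      else na) na) na

def pvBodyA (a : PySem.Dict String Int) : PySem.Dict String Int := pvG a a

def pvBodyB (a : PySem.Dict String Int) : PySem.Dict String Int :=
  a.items.foldl (fun na sp =>
    ((a.items.foldl (fun idx ep => idx.modify (pvChr ep.1 0, pvChr ep.1 1) [] (· ++ [ep]))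
        PySem.Dict.empty).getD (pvChr sp.1 2, pvChr sp.1 1) []).foldl (fun na ep =>
      if pvChr sp.1 0 != pvChr ep.1 2 then
        na.insert (pvCat sp.1 ep.1) (sp.2 + ep.2)
      else na) na) a

-- A's (angles, newAngles) pair fold carries the invariant angles = newAngles at the
-- top of each round, so it collapses to a single-dict fold.
theorem pv_pairfold {α β : Type} (G : α → α → α) (l : List β) (d : α) :
    ((l.foldl (fun st (_ : β) => (G st.1 st.2, G st.1 st.2)) (d, d)).1) =
      l.foldl (fun a _ => G a a) d := by
  induction l generalizing d with
  | nil => rfl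
  | cons x xs ih => simpa using ih (G d d)

-- a fold of guarded inserts preserves distinctness of keys
theorem pv_nodup_foldl {β : Type} (l : List β) (cond : β → Bool) (k : β → String)
    (v : β → Int) (d : PySem.Dict String Int) (h : d.keys.Nodup) :
    (l.foldl (fun na ep => if cond ep then na.insert (k ep) (v ep) else na) d).keys.Nodup := by
  induction l generalizing d with
  | nil => exact h
  | cons x xs ih =>
      simp only [List.foldl_cons]
      split
      · exact ih _ (PySem.Dict.nodup_keys_insert _ _ _ h)
      · exact ih _ h

theorem pv_nodup_foldl2 {β : Type} (lo li : List β) (C : β → β → Bool) (K : β → β → String)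
    (V : β → β → Int) (d : PySem.Dict String Int) (h : d.keys.Nodup) :
    (lo.foldl (fun na sp =>
        li.foldl (fun na ep => if C sp ep then na.insert (K sp ep) (V sp ep) else na) na) d).keys.Nodup := by
  induction lo generalizing d with
  | nil => exact h
  | cons x xs ih =>
      simp only [List.foldl_cons]
      exact ih _ (pv_nodup_foldl li (C x) (K x) (V x) d h)

theorem pv_nodup_bodyA (a : PySem.Dict String Int) (h : a.keys.Nodup) :
    (pvBodyA a).keys.Nodup :=
  pv_nodup_foldl2 a.items a.items
    (fun sp ep => pvChr sp.1 1 == pvChr ep.1 1 && pvChr sp.1 2 == pvChr ep.1 0 && pvChr sp.1 0 != pvChr ep.1 2)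
    (fun sp ep => pvCat sp.1 ep.1) (fun sp ep => a.getD sp.1 0 + a.getD ep.1 0) a h

-- grouping: the bucket of B's index at q is the order-preserving filter of the items
theorem pv_group {β κ : Type} [BEq κ] [LawfulBEq κ] (l : List β) (k : β → κ) (q : κ) :
    (l.foldl (fun idx ep => idx.modify (k ep) [] (· ++ [ep])) PySem.Dict.empty).getD q [] =
      l.filter (fun ep => k ep == q) := by
  have h1 : l.foldl (fun idx ep => idx.modify (k ep) [] (· ++ [ep])) PySem.Dict.empty =
      (l.map (fun ep => (k ep, ep))).foldl (fun idx p => idx.modify p.1 [] (· ++ [p.2]))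
        PySem.Dict.empty := by
    rw [List.foldl_map]
  rw [h1, PySem.Dict.getD_foldl_modify_append]
  simp [List.filter_map, Function.comp_def]

-- splitting a conjunctive guard into a filter stage and a residual guard
theorem pv_filterfold {β γ : Type} (l : List β) (p q : β → Bool) (g : γ → β → γ) (init : γ) :
    l.foldl (fun na e => if p e && q e then g na e else na) init =
      (l.filter p).foldl (fun na e => if q e then g na e else na) init := by
  induction l generalizing init with
  | nil => rfl
  | cons x xs ih =>
      simp only [List.foldl_cons, List.filter_cons]
      by_cases hp : p x = true
      · by_cases hq : q x = true
        · rw [if_pos (by simp [hp, hq]), if_pos hp, List.foldl_cons, if_pos hq]; exact ih _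
        · rw [if_neg (by simp [hp, hq]), if_pos hp, List.foldl_cons, if_neg hq]; exact ih _
      · rw [if_neg (by simp [hp]), if_neg hp]; exact ih _

-- A's three-way test equals "index key matches, then the residual inequality"
theorem pv_cond_eq (s e : String) :
    (pvChr s 1 == pvChr e 1 && pvChr s 2 == pvChr e 0 && pvChr s 0 != pvChr e 2) =
      (((pvChr e 0, pvChr e 1) == (pvChr s 2, pvChr s 1)) && (pvChr s 0 != pvChr e 2)) := by
  rw [Bool.eq_iff_iff]
  simp only [Bool.and_eq_true, beq_iff_eq, Prod.mk.injEq, bne_iff_ne]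
  constructor
  · rintro ⟨⟨h1, h2⟩, h3⟩; exact ⟨⟨h2.symm, h1.symm⟩, h3⟩
  · rintro ⟨⟨h2, h1⟩, h3⟩; exact ⟨⟨h1.symm, h2.symm⟩, h3⟩

theorem pv_body_eq (a : PySem.Dict String Int) (h : a.keys.Nodup) :
    pvBodyA a = pvBodyB a := by
  unfold pvBodyA pvG pvBodyB
  apply PySem.List.foldl_congr_mem'
  intro sp hsp acc
  rw [pv_group a.items (fun ep => (pvChr ep.1 0, pvChr ep.1 1)) (pvChr sp.1 2, pvChr sp.1 1)]
  rw [← pv_filterfold a.items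
        (fun ep => ((pvChr ep.1 0, pvChr ep.1 1) == (pvChr sp.1 2, pvChr sp.1 1)))
        (fun ep => pvChr sp.1 0 != pvChr ep.1 2)
        (fun na ep => na.insert (pvCat sp.1 ep.1) (sp.2 + ep.2)) acc]
  apply PySem.List.foldl_congr_mem'
  intro ep hep acc'
  rw [pv_cond_eq sp.1 ep.1]
  rw [PySem.Dict.getD_of_mem_items a (by simpa using hsp : (sp.1, sp.2) ∈ a.items) h 0,
      PySem.Dict.getD_of_mem_items a (by simpa using hep : (ep.1, ep.2) ∈ a.items) h 0]

theorem pv_loop_eq (l : List Int) (d : PySem.Dict String Int) (h : d.keys.Nodup) :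
    l.foldl (fun a _ => pvBodyA a) d = l.foldl (fun a _ => pvBodyB a) d := by
  induction l generalizing d with
  | nil => rfl
  | cons x xs ih =>
      simp only [List.foldl_cons]
      rw [← pv_body_eq d h]
      exact ih _ (pv_nodup_bodyA d h)

-- ===== VERDICT (by name: the statement is the Claim_ definition above) =====
theorem makeConcatonatedAngles_spec : Claim_equal_makeConcatonatedAngles := by
  intro angles times _ _
  show (((PySem.List.pyRange 0 times 1).foldl (fun st _ => (pvG st.1 st.2, pvG st.1 st.2))
      (PySem.Dict.ofList angles, PySem.Dict.ofList angles)).1).items =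
    ((PySem.List.pyRange 0 times 1).foldl (fun a _ => pvBodyB a) (PySem.Dict.ofList angles)).items
  rw [pv_pairfold pvG]
  show ((PySem.List.pyRange 0 times 1).foldl (fun a _ => pvBodyA a) (PySem.Dict.ofList angles)).items =
    ((PySem.List.pyRange 0 times 1).foldl (fun a _ => pvBodyB a) (PySem.Dict.ofList angles)).items
  rw [pv_loop_eq (PySem.List.pyRange 0 times 1) (PySem.Dict.ofList angles)
        (PySem.Dict.nodup_keys_ofList angles)]
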